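-- pv_equiv track=rewrite | github.com/Daniwave100/CIS-151---Fundamentals-of-Computer-Programming | labs/lab6.py | extract_full_name
-- ===== SOURCE A (Python) =====
-- def extract_full_name(p1: str) -> str:
--     items = p1.split(",")
--     first_name = ""
--     last_name = ""
--
--     for item in items:
--         key, value = item.split(":")
--         if key == "first_name":
--             first_name = value
--         elif key == "last_name":
--             last_name = value
--
--     full_name = first_name + " " + last_name
--     return full_name
-- ===== SOURCE B (Python) =====
-- def _value_of(pairs, key):
--     for k, v in reversed(pairs):
--         if k == key:
--             return v
--     return ""
--
-- def extract_full_name(p1: str) -> str: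
--     pairs = [item.split(":") for item in p1.split(",")]
--     return _value_of(pairs, "first_name") + " " + _value_of(pairs, "last_name")
-- ===== Notes on version B (the rewrite author's own statement) =====
-- stated objective: alternative
-- what changed: Replaces A's single forward pass with mutable first/last accumulators by two stateless backward scans: split all pairs once, then search the reversed pair list for the last binding of each key (last-write-wins becomes first-match-in-reverse).
import Mathlib
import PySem

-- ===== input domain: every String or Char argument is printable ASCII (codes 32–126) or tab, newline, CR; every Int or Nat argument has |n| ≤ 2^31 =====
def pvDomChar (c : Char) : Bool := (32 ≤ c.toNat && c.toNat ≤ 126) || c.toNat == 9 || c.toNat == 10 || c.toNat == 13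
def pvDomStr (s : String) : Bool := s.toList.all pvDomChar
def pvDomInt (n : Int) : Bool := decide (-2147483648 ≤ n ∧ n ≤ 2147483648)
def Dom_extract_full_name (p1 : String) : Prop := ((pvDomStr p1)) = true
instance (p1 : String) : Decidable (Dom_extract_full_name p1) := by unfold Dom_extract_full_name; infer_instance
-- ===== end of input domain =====

-- B replaces A's forward accumulator loop by two backward scans over the once-split pair list (alternative decomposition; same cost).

-- ===== PORT A =====
-- the body of A's for-loop: unpack 'key:value', then the if/elif assignments
-- (strings handled as List Char via PySem.Chars, exact for split/concat)
def pvStepA (st : List Char × List Char) (item : List Char) : List Char × List Char :=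
  match PySem.Chars.splitOn item [':'] with
  | [key, value] =>
      if key = ['f','i','r','s','t','_','n','a','m','e'] then (value, st.2)
      else if key = ['l','a','s','t','_','n','a','m','e'] then (st.1, value)
      else st
  | _ => st  -- unreachable under Pre_ (Python raises ValueError here)

def extract_full_name (p1 : String) : String :=
  let items := PySem.Chars.splitOn p1.toList [',']
  let st := items.foldl pvStepA ([], [])
  String.ofList (st.1 ++ [' '] ++ st.2)

-- ===== PORT B =====
-- _value_of: first match scanning the reversed pair list, else ""
def pvFind : List (List (List Char)) → List Char → List Char
  | [], _ => []
  | p :: rest, key =>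
    match p with
    | [k, v] => if k = key then v else pvFind rest key
    | _ => pvFind rest key  -- unreachable under Pre_ (Python raises ValueError here)

def extract_full_name_alt (p1 : String) : String :=
  let pairs := (PySem.Chars.splitOn p1.toList [',']).map
    (fun item => PySem.Chars.splitOn item [':'])
  String.ofList (pvFind pairs.reverse ['f','i','r','s','t','_','n','a','m','e'] ++ [' '] ++
                 pvFind pairs.reverse ['l','a','s','t','_','n','a','m','e'])

-- ===== PRECONDITION & SPEC =====
-- Pre_ excludes exactly the inputs where Python A raises ValueError: some comma-separated
-- item does not split on ":" into exactly two parts.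
def Pre_extract_full_name (p1 : String) : Prop :=
  ∀ item ∈ PySem.Chars.splitOn p1.toList [','], (PySem.Chars.splitOn item [':']).length = 2
instance (p1 : String) : Decidable (Pre_extract_full_name p1) := by
  unfold Pre_extract_full_name; infer_instance

def pvWitness_extract_full_name : String := "first_name:Ada,last_name:Lovelace"

def Spec_extract_full_name (p1 : String) (out : String) : Prop := out = extract_full_name_alt p1
instance (p1 : String) (out : String) : Decidable (Spec_extract_full_name p1 out) := by unfold Spec_extract_full_name; infer_instance

-- ===== CLAIM (what is proved, stated in full; the proofs are below) =====
def Claim_equal_extract_full_name : Prop := ∀ (p1 : String), Dom_extract_full_name p1 → Pre_extract_full_name p1 → Spec_extract_full_name p1 (extract_full_name p1)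

-- ===== LEMMAS AND PROOFS =====

-- default-carrying version of pvFind, for the loop invariant
def pvFindD : List (List (List Char)) → List Char → List Char → List Char
  | [], _, d => d
  | p :: rest, key, d =>
    match p with
    | [k, v] => if k = key then v else pvFindD rest key d
    | _ => pvFindD rest key d

lemma pvFind_eq_findD (xs : List (List (List Char))) (key : List Char) :
    pvFind xs key = pvFindD xs key [] := by
  induction xs with
  | nil => rfl
  | cons p rest ih =>
    cases p with
    | nil => simpa [pvFind, pvFindD] using ih
    | cons a t =>
      cases t with
      | nil => simpa [pvFind, pvFindD] using ih
      | cons b u =>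
        cases u with
        | nil => simp [pvFind, pvFindD, ih]
        | cons c w => simpa [pvFind, pvFindD] using ih

lemma pvFindD_append_singleton (xs : List (List (List Char))) (p : List (List Char))
    (key d : List Char) :
    pvFindD (xs ++ [p]) key d =
      pvFindD xs key (match p with
        | [k, v] => if k = key then v else d
        | _ => d) := by
  induction xs with
  | nil =>
    rcases p with _ | ⟨a, _ | ⟨b, _ | ⟨c, w⟩⟩⟩ <;> simp [pvFindD]
  | cons q rest ih =>
    rcases q with _ | ⟨a, _ | ⟨b, _ | ⟨c, w⟩⟩⟩ <;> simp [pvFindD, ih]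

-- loop invariant: A's accumulator pair equals B's two reverse searches with the
-- accumulator values as defaults
lemma pv_loop_inv (items : List (List Char)) (f l : List Char) :
    items.foldl pvStepA (f, l) =
      (pvFindD (items.map (fun i => PySem.Chars.splitOn i [':'])).reverse
         ['f','i','r','s','t','_','n','a','m','e'] f,
       pvFindD (items.map (fun i => PySem.Chars.splitOn i [':'])).reverse
         ['l','a','s','t','_','n','a','m','e'] l) := by
  induction items generalizing f l with
  | nil => simp [pvFindD]
  | cons item rest ih =>
    simp only [List.foldl_cons, List.map_cons, List.reverse_cons,
      pvFindD_append_singleton]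
    rcases hsp : PySem.Chars.splitOn item [':'] with _ | ⟨k, _ | ⟨v, _ | w⟩⟩ <;>
      simp only [pvStepA, hsp]
    · exact ih f l
    · exact ih f l
    · by_cases hf : k = ['f','i','r','s','t','_','n','a','m','e']
      · subst hf
        simp only [if_neg (by decide : ¬ (['f','i','r','s','t','_','n','a','m','e'] : List Char) = ['l','a','s','t','_','n','a','m','e'])]
        exact ih v l
      · by_cases hl : k = ['l','a','s','t','_','n','a','m','e']
        · subst hl
          simp only [if_neg (by decide : ¬ (['l','a','s','t','_','n','a','m','e'] : List Char) = ['f','i','r','s','t','_','n','a','m','e'])]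
          exact ih f v
        · simp only [if_neg hf, if_neg hl]
          exact ih f l
    · exact ih f l

-- ===== VERDICT (by name: the statement is the Claim_ definition above) =====
theorem extract_full_name_spec : Claim_equal_extract_full_name := by
  intro p1 _ _
  unfold Spec_extract_full_name extract_full_name extract_full_name_alt
  simp only [pv_loop_inv, pvFind_eq_findD]
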